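-- pv_equiv track=rewrite | github.com/aminemahd13/covapsy | ros2_ws/src/covapsy_bridge/covapsy_bridge/usb_protocol.py | sanitize_lcd_cell
-- ===== SOURCE A (Python) =====
-- LCD_LINE_CHARS = 16
--
-- def sanitize_lcd_cell(text: str, max_chars: int = LCD_LINE_CHARS) -> str:
--     raw = str(text or '').upper()
--     cleaned = []
--     for ch in raw:
--         code = ord(ch)
--         if code < 32 or code > 126:
--             cleaned.append(' ')
--             continue
--         if ch in {',', '|'}:
--             cleaned.append('/')
--             continue
--         cleaned.append(ch)
--     return ''.join(cleaned)[:max_chars]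
-- ===== SOURCE B (Python) =====
-- LCD_LINE_CHARS = 16
--
-- # Translation table built once: control codes 0-31 and DEL (127) map to ' ',
-- # ',' and '|' map to '/'; every other code passes through str.translate
-- # unchanged.  (All other non-printables are > 127 and cannot appear in the
-- # ASCII input domain this is specified over.)
-- _LCD_TABLE = str.maketrans(
--     {code: ' ' for code in range(32)} | {127: ' ', ord(','): '/', ord('|'): '/'}
-- )
--
--
-- def sanitize_lcd_cell(text: str, max_chars: int = LCD_LINE_CHARS) -> str:
--     # Truncate first (the remapping is per-character, so it commutes with
--     # slicing), then remap the window through the precomputed table.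
--     return str(text or '').upper()[:max_chars].translate(_LCD_TABLE)
-- ===== Notes on version B (the rewrite author's own statement) =====
-- stated objective: idiomatic
-- what changed: B replaces A's per-character ord() branching loop (append ' ', '/', or ch, then truncate) with a translation table built once (codes 0-31 and 127 to ' ', ',' and '|' to '/') applied via str.translate to the window already truncated to max_chars.
import Mathlib
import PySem

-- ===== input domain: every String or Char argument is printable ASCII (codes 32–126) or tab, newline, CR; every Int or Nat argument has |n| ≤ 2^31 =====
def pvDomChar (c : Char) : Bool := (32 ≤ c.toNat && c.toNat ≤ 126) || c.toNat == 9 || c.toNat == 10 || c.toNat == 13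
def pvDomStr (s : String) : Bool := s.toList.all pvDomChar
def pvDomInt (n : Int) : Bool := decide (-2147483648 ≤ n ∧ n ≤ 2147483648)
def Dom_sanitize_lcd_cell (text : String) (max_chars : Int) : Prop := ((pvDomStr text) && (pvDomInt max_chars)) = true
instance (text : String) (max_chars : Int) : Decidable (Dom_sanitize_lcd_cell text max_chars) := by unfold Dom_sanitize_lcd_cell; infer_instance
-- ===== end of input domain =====

-- B replaces A's per-character ord()-branching loop with a translation table built once
-- (codes 0-31 and 127 ↦ ' ', ',' and '|' ↦ '/') applied via str.translate to the window
-- already truncated to max_chars (objective: idiomatic; same return value on the domain).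

-- ===== PORT A =====
-- the loop body: one cleaned.append(...) per character
def pvCleanStepA (acc : List Char) (ch : Char) : List Char :=
  let code := ch.toNat
  if code < 32 ∨ code > 126 then acc ++ [' ']
  else if ch = ',' ∨ ch = '|' then acc ++ ['/']
  else acc ++ [ch]

def sanitize_lcd_cell (text : String) (max_chars : Int) : String :=
  -- `text or ''` is the identity on a str argument ('' stays ''), so raw = text.upper()
  let raw := PySem.Str.upper text
  let cleaned := raw.toList.foldl pvCleanStepA []
  String.ofList (PySem.List.slice cleaned none (some max_chars))

-- ===== PORT B =====
-- _LCD_TABLE = str.maketrans({code: ' ' for code in range(32)} | {127: ' ', 44: '/', 124: '/'})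
def pvTransTable : PySem.Dict Int Char :=
  ((((PySem.List.pyRange 0 32 1).foldl (fun d code => d.insert code ' ')
      PySem.Dict.empty).insert 127 ' ').insert 44 '/').insert 124 '/'

def sanitize_lcd_cell_alt (text : String) (max_chars : Int) : String :=
  -- str(text or '').upper()[:max_chars].translate(_LCD_TABLE):
  -- translate maps each char by table lookup on its code, keeping it when absent
  let window := PySem.List.slice (PySem.Str.upper text).toList none (some max_chars)
  String.ofList (window.map (fun ch => pvTransTable.getD (ch.toNat : Int) ch))

-- ===== PRECONDITION & SPEC =====
def Spec_sanitize_lcd_cell (text : String) (max_chars : Int) (out : String) : Prop := out = sanitize_lcd_cell_alt text max_chars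
instance (text : String) (max_chars : Int) (out : String) : Decidable (Spec_sanitize_lcd_cell text max_chars out) := by unfold Spec_sanitize_lcd_cell; infer_instance

-- ===== CLAIM (what is proved, stated in full; the proofs are below) =====
def Claim_equal_sanitize_lcd_cell : Prop := ∀ (text : String) (max_chars : Int), Dom_sanitize_lcd_cell text max_chars → Spec_sanitize_lcd_cell text max_chars (sanitize_lcd_cell text max_chars)

-- ===== LEMMAS AND PROOFS =====

-- A's loop computes a pointwise map with this function
def pvMapA (ch : Char) : Char :=
  if ch.toNat < 32 ∨ ch.toNat > 126 then ' '
  else if ch = ',' ∨ ch = '|' then '/' else ch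

theorem pvFoldlA_eq_map (l : List Char) (acc : List Char) :
    l.foldl pvCleanStepA acc = acc ++ l.map pvMapA := by
  induction l generalizing acc with
  | nil => simp
  | cons c t ih =>
      simp only [List.foldl_cons, List.map_cons, ih, pvCleanStepA, pvMapA]
      by_cases hr : c.toNat < 32 ∨ c.toNat > 126
      · simp [hr]
      · by_cases hm : c = ',' ∨ c = '|'
        · simp [hr, hm]
        · simp [hr, hm]

-- slicing commutes with a map (slice reads only the list's length for its bounds)
theorem pvSlice_map {α β : Type} (f : α → β) (xs : List α) (a? b? : Option Int) :
    PySem.List.slice (xs.map f) a? b? = (PySem.List.slice xs a? b?).map f := by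
  simp [PySem.List.slice, List.map_take, List.map_drop]

-- lookup in the dict built by the range-32 comprehension
theorem pvFoldInsert_getD (lo hi n : Int) (d0 : Char) (acc : PySem.Dict Int Char) :
    ((PySem.List.pyRange lo hi 1).foldl (fun d c => d.insert c ' ') acc).getD n d0 =
      if lo ≤ n ∧ n < hi then ' ' else acc.getD n d0 := by
  by_cases hlt : lo < hi
  · rw [PySem.List.pyRange_one_cons hlt, List.foldl_cons,
        pvFoldInsert_getD (lo + 1) hi n d0 (acc.insert lo ' '),
        PySem.Dict.getD_insert]
    split_ifs <;> simp_all <;> omega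
  · rw [PySem.List.pyRange_one_eq_nil (by omega), List.foldl_nil]
    split_ifs with h
    · omega
    · rfl
termination_by (hi - lo).toNat
decreasing_by omega

-- closed form of the whole translation table
theorem pvTbl_getD (n : Int) (d : Char) :
    pvTransTable.getD n d =
      if 0 ≤ n ∧ n < 32 then ' '
      else if n = 127 then ' '
      else if n = 44 ∨ n = 124 then '/' else d := by
  simp only [pvTransTable, PySem.Dict.getD_insert, pvFoldInsert_getD,
    PySem.Dict.getD_empty]
  split_ifs <;> simp_all

-- upper-casing a domain character stays at code ≤ 126
theorem pvUpper_le (c : Char) (h : pvDomChar c = true) :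
    (PySem.Chars.upperChar c).toNat ≤ 126 := by
  have hc : c.toNat ≤ 126 := by
    simp only [pvDomChar, Bool.or_eq_true, Bool.and_eq_true, decide_eq_true_eq,
      beq_iff_eq] at h
    omega
  unfold PySem.Chars.upperChar
  split_ifs with hl
  · have : c.toNat - 32 < 127 := by omega
    rw [Char.toNat_ofNat, if_pos (Or.inl (by omega))]
    omega
  · exact hc

-- chars with equal codes are equal
theorem pvChar_eq_of_toNat (c d : Char) (h : c.toNat = d.toNat) : c = d :=
  Char.ext (UInt32.toNat_inj.mp h)

-- the table lookup agrees with A's branching on every char of code ≤ 126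
theorem pvPointwise (c : Char) (h : c.toNat ≤ 126) :
    pvTransTable.getD (c.toNat : Int) c = pvMapA c := by
  rw [pvTbl_getD]
  unfold pvMapA
  by_cases h32 : c.toNat < 32
  · rw [if_pos ⟨by positivity, by exact_mod_cast h32⟩, if_pos (Or.inl h32)]
  · rw [if_neg (by omega), if_neg (by omega),
        if_neg (by omega : ¬ (c.toNat < 32 ∨ c.toNat > 126))]
    by_cases h44 : c.toNat = 44
    · rw [if_pos (Or.inl (by exact_mod_cast h44)),
          if_pos (Or.inl (pvChar_eq_of_toNat c ',' h44))]
    · by_cases h124 : c.toNat = 124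
      · rw [if_pos (Or.inr (by exact_mod_cast h124)),
            if_pos (Or.inr (pvChar_eq_of_toNat c '|' h124))]
      · rw [if_neg (by omega), if_neg (by
          rintro (rfl | rfl) <;> simp_all)]

-- ===== VERDICT (by name: the statement is the Claim_ definition above) =====
theorem sanitize_lcd_cell_spec : Claim_equal_sanitize_lcd_cell := by
  intro text max_chars hdom
  show sanitize_lcd_cell text max_chars = sanitize_lcd_cell_alt text max_chars
  simp only [sanitize_lcd_cell, sanitize_lcd_cell_alt, pvFoldlA_eq_map, List.nil_append,
    PySem.Str.toList_upper, PySem.Chars.upper, pvSlice_map, List.map_map]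
  congr 1
  apply List.map_congr_left
  intro c hc
  have hmem : c ∈ text.toList := PySem.List.mem_of_mem_slice _ _ _ hc
  have hdomc : pvDomChar c = true := by
    have := (Bool.and_eq_true _ _).mp hdom |>.1
    simpa [pvDomStr] using (List.all_eq_true.mp this c hmem)
  simp [Function.comp, pvPointwise _ (pvUpper_le c hdomc)]
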